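-- pv_equiv track=rewrite | github.com/sooshh/mainRepo | 1701/homeBrewDatabaseModule.py | projectCSV
-- ===== SOURCE A (Python) =====
-- def projectCSV(csv,chosenOptions): #this gets the columns the user wants to keep then deletrs the ones that are not listed
--     itemsToKeep = [] #a list for storing the users choices
--     keptItems = [] #a list for the newly formatted list according to the user
--     for input in range(1,len(chosenOptions)):
--         itemsToKeep.append(chosenOptions[input]) #adds the chosen column to the list
--     for row in csv:
--         temp = [] #temp list for storing data before adding to the final list
--         for column in range(len(row)):
--             for keep in itemsToKeep:
--                 if column == csv[0].index(keep): #checks if the current item being scanned is apart of the whitelist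
--                     temp.append(row[column]) #adds the whitelisted item to the temp list
--         keptItems.append(temp) #adds the temp list to the main list
--     return keptItems
-- ===== SOURCE B (Python) =====
-- def projectCSV(csv, chosenOptions):
--     if not csv:
--         return []
--     header = csv[0]
--     indices = sorted(header.index(opt) for opt in chosenOptions[1:])
--     return [[row[i] for i in indices if i < len(row)] for row in csv]
-- ===== Notes on version B (the rewrite author's own statement) =====
-- stated objective: faster
-- what changed: B precomputes the sorted list of header indices of the chosen columns once and gathers each row's cells directly, instead of A's per-row, per-column, per-option rescans of the header with list.index.
-- outside the precondition, e.g. on projectCSV([[], []], ['id', 'x']): A returns [[], []], B raises ValueError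
import Mathlib
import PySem

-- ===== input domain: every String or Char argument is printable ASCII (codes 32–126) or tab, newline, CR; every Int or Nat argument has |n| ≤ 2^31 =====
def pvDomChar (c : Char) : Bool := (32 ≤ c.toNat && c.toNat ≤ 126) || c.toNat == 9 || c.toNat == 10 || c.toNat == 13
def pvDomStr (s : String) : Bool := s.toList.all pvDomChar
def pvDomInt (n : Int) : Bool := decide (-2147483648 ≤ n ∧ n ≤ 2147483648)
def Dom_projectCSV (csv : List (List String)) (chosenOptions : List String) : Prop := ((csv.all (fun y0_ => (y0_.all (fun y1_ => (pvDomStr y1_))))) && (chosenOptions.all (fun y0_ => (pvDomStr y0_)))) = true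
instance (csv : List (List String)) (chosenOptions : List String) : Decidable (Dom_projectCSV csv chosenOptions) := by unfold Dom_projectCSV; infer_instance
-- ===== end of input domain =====

-- B replaces A's per-row per-column header rescans by one precomputed sorted index table and a direct gather (measured faster, asymptotically fewer header scans).


-- ===== PORT A =====
def projectCSV (csv : List (List String)) (chosenOptions : List String) : List (List String) :=
  let itemsToKeep : List String :=
    (PySem.List.pyRange 1 (chosenOptions.length : Int) 1).foldl
      (fun acc i => acc ++ [PySem.List.pyGetD chosenOptions i ""]) []
  csv.foldl
    (fun keptItems row =>
      let temp : List String :=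
        (PySem.List.pyRange 0 (row.length : Int) 1).foldl
          (fun temp column =>
            itemsToKeep.foldl
              (fun t keep =>
                -- csv[0].index(keep): the 'none' (ValueError) branch is excluded by Pre_projectCSV
                match PySem.List.index? (csv.headD []) keep with
                | some j => if column = (j : Int) then t ++ [PySem.List.pyGetD row column ""] else t
                | none => t)
              temp)
          []
      keptItems ++ [temp])
    []

-- ===== PORT B =====
def projectCSV_alt (csv : List (List String)) (chosenOptions : List String) : List (List String) :=
  match csv with
  | [] => []
  | header :: rest =>
    let indices : List Int :=
      PySem.List.sorted
        ((chosenOptions.drop 1).map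
          (fun opt => (((PySem.List.index? header opt).getD 0 : Nat) : Int)))
        (fun x => x) false
    (header :: rest).map (fun row =>
      (indices.filter (fun i => i < (row.length : Int))).map
        (fun i => PySem.List.pyGetD row i ""))

-- ===== PRECONDITION & SPEC =====
-- Pre_ excludes inputs where some chosen option is missing from the header row: A raises
-- ValueError there whenever any row is nonempty, and B raises ValueError there even when
-- every row is empty (the one excluded corner on which A still returns, cited in the claim).
def Pre_projectCSV (csv : List (List String)) (chosenOptions : List String) : Prop :=
  csv = [] ∨ ∀ k ∈ chosenOptions.drop 1, k ∈ csv.headD []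
instance (csv : List (List String)) (chosenOptions : List String) : Decidable (Pre_projectCSV csv chosenOptions) := by unfold Pre_projectCSV; infer_instance

def pvWitness_projectCSV : List (List String) × List String :=
  ([["a", "b"], ["x", "y", "z"], ["u"]], ["hdr", "b", "a", "b"])

def Spec_projectCSV (csv : List (List String)) (chosenOptions : List String) (out : List (List String)) : Prop := out = projectCSV_alt csv chosenOptions
instance (csv : List (List String)) (chosenOptions : List String) (out : List (List String)) : Decidable (Spec_projectCSV csv chosenOptions out) := by unfold Spec_projectCSV; infer_instance

-- ===== CLAIM (what is proved, stated in full; the proofs are below) =====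
def Claim_equal_projectCSV : Prop := ∀ (csv : List (List String)) (chosenOptions : List String), Dom_projectCSV csv chosenOptions → Pre_projectCSV csv chosenOptions → Spec_projectCSV csv chosenOptions (projectCSV csv chosenOptions)

-- ===== LEMMAS AND PROOFS =====

-- in a nondecreasing list, the elements < n+1 are the elements < n followed by those = n
lemma filter_lt_succ_of_sorted (s : List Int) (n : Int) (hs : s.Pairwise (· ≤ ·)) :
    s.filter (fun i => i < n + 1) = s.filter (fun i => i < n) ++ s.filter (fun i => i = n) := by
  induction s with
  | nil => simp
  | cons a t ih =>
    rw [List.pairwise_cons] at hs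
    obtain ⟨ha, ht⟩ := hs
    have iht := ih ht
    rcases lt_trichotomy a n with h | h | h
    · rw [List.filter_cons, List.filter_cons, List.filter_cons,
        if_pos (show decide (a < n + 1) = true by simp; omega),
        if_pos (show decide (a < n) = true by simp [h]),
        if_neg (show ¬ decide (a = n) = true by simp; omega),
        iht, List.cons_append]
    · subst h
      have h1 : t.filter (fun i => decide (i < a)) = [] := by
        rw [List.filter_eq_nil_iff]; intro b hb; have := ha b hb; simp; omega
      have h2 : t.filter (fun i => decide (i < a + 1)) = t.filter (fun i => decide (i = a)) := by
        apply List.filter_congr; intro b hb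
        have := ha b hb
        rcases Decidable.em (b = a) with hba | hba
        · simp [hba]
        · simp [hba]; omega
      rw [List.filter_cons, List.filter_cons, List.filter_cons,
        if_pos (show decide (a < a + 1) = true by simp),
        if_neg (show ¬ decide (a < a) = true by simp),
        if_pos (show decide (a = a) = true by simp),
        h1, h2, List.nil_append]
    · have e1 : (a :: t).filter (fun i => decide (i < n + 1)) = [] := by
        rw [List.filter_eq_nil_iff]; intro b hb
        rcases List.mem_cons.1 hb with rfl | hb
        · simp; omega
        · have := ha b hb; simp; omega
      have e2 : (a :: t).filter (fun i => decide (i < n)) = [] := by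
        rw [List.filter_eq_nil_iff]; intro b hb
        rcases List.mem_cons.1 hb with rfl | hb
        · simp; omega
        · have := ha b hb; simp; omega
      have e3 : (a :: t).filter (fun i => decide (i = n)) = [] := by
        rw [List.filter_eq_nil_iff]; intro b hb
        rcases List.mem_cons.1 hb with rfl | hb
        · simp; omega
        · have := ha b hb; simp; omega
      rw [e1, e2, e3]; rfl

-- the core gather equivalence for one row
lemma gather_eq (row header keeps : List String)
    (hpre : ∀ k ∈ keeps, k ∈ header) :
    (PySem.List.pyRange 0 (row.length : Int) 1).foldl
      (fun temp column =>
        keeps.foldl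
          (fun t keep =>
            match PySem.List.index? header keep with
            | some j => if column = (j : Int) then t ++ [PySem.List.pyGetD row column ""] else t
            | none => t)
          temp)
      []
    = ((PySem.List.sorted
          (keeps.map (fun opt => (((PySem.List.index? header opt).getD 0 : Nat) : Int)))
          (fun x => x) false).filter (fun i => i < (row.length : Int))).map
        (fun i => PySem.List.pyGetD row i "") := by
  set idx : String → Int := fun k => (((PySem.List.index? header k).getD 0 : Nat) : Int) with hidx
  set idxs : List Int := keeps.map idx with hidxs
  set f : Int → String := fun i => PySem.List.pyGetD row i "" with hf
  -- step 1: the inner loop is a conditional-append loop over keeps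
  have inner : ∀ (c : Int) (temp : List String),
      keeps.foldl
        (fun t keep =>
          match PySem.List.index? header keep with
          | some j => if c = (j : Int) then t ++ [PySem.List.pyGetD row c ""] else t
          | none => t)
        temp
      = temp ++ (idxs.filter (fun i => i = c)).map (fun _ => f c) := by
    intro c temp
    have step : keeps.foldl
        (fun t keep =>
          match PySem.List.index? header keep with
          | some j => if c = (j : Int) then t ++ [PySem.List.pyGetD row c ""] else t
          | none => t)
        temp
        = keeps.foldl
            (fun t keep => if (fun k => decide (idx k = c)) keep = true then t ++ [(fun _ => f c) keep] else t) temp := by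
      apply PySem.List.foldl_congr_mem
      intro t keep hk
      have hmem : keep ∈ header := hpre keep hk
      obtain ⟨j, hj⟩ := Option.isSome_iff_exists.1 ((PySem.List.index?_isSome_iff header keep).2 hmem)
      have hidxk : idx keep = (j : Int) := by
        simp only [hidx, hj, Option.getD_some]
      rw [hj]
      by_cases hc : c = (j : Int)
      · simp [hidxk, hc, hf]
      · have hc' : ¬ ((j : Int) = c) := fun h => hc h.symm
        simp [hidxk, hc, hc']
    rw [step, PySem.List.foldl_append_if (fun k => decide (idx k = c)) (fun _ => f c)]
    congr 1
    rw [hidxs, List.filter_map]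
    simp [Function.comp_def, List.map_const']
  -- step 2: the outer loop extends with blocks
  have outer : (PySem.List.pyRange 0 (row.length : Int) 1).foldl
      (fun temp column =>
        keeps.foldl
          (fun t keep =>
            match PySem.List.index? header keep with
            | some j => if column = (j : Int) then t ++ [PySem.List.pyGetD row column ""] else t
            | none => t)
          temp)
      []
      = (PySem.List.pyRange 0 (row.length : Int) 1).flatMap
          (fun c => (idxs.filter (fun i => i = c)).map (fun _ => f c)) := by
    have := PySem.List.foldl_congr_mem
      (l := PySem.List.pyRange 0 (row.length : Int) 1)
      (f := fun temp column =>
        keeps.foldl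
          (fun t keep =>
            match PySem.List.index? header keep with
            | some j => if column = (j : Int) then t ++ [PySem.List.pyGetD row column ""] else t
            | none => t)
          temp)
      (g := fun temp c => temp ++ (idxs.filter (fun i => i = c)).map (fun _ => f c))
      (init := []) (by intro acc c _; exact inner c acc)
    rw [this, PySem.List.foldl_append_eq_flatMap]
    simp
  rw [outer]
  -- step 3: induction on the row length
  have hnn : ∀ i ∈ idxs, 0 ≤ i := by
    intro i hi
    rw [hidxs] at hi
    obtain ⟨k, _, rfl⟩ := List.mem_map.1 hi
    positivity
  have main : ∀ n : Nat,
      (PySem.List.pyRange 0 (n : Int) 1).flatMap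
        (fun c => (idxs.filter (fun i => i = c)).map (fun _ => f c))
      = ((PySem.List.sorted idxs (fun x => x) false).filter (fun i => i < (n : Int))).map f := by
    intro n
    induction n with
    | zero =>
      rw [PySem.List.pyRange_one_eq_nil (by omega)]
      have : (PySem.List.sorted idxs (fun x => x) false).filter (fun i => i < (0 : Int)) = [] := by
        rw [List.filter_eq_nil_iff]
        intro i hi
        have := hnn i ((PySem.List.mem_sorted idxs (fun x => x) false i).1 hi)
        simp; omega
      simp [this]
    | succ n ih =>
      have hcast : ((n + 1 : Nat) : Int) = (n : Int) + 1 := by push_cast; ring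
      rw [hcast, PySem.List.pyRange_one_succ_right (by positivity), List.flatMap_append,
        filter_lt_succ_of_sorted _ _
          (by simpa using PySem.List.sorted_pairwise idxs (fun x => x)),
        List.map_append, ← ih]
      congr 1
      -- the block at column n equals the sorted run of value n, mapped
      have hperm : ((PySem.List.sorted idxs (fun x => x) false).filter (fun i => i = (n : Int))).Perm
          (idxs.filter (fun i => i = (n : Int))) :=
        (PySem.List.sorted_perm idxs (fun x => x) false).filter _
      have hconst : ((PySem.List.sorted idxs (fun x => x) false).filter (fun i => i = (n : Int))).map f
          = ((PySem.List.sorted idxs (fun x => x) false).filter (fun i => i = (n : Int))).map (fun _ => f (n : Int)) := by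
        apply List.map_congr_left
        intro i hi
        have : i = (n : Int) := by simpa using (List.mem_filter.1 hi).2
        rw [this]
      rw [List.flatMap_singleton, hconst, List.map_const', List.map_const', hperm.length_eq]
  exact main row.length

-- itemsToKeep is chosenOptions[1:]
lemma itemsToKeep_eq (chosenOptions : List String) :
    (PySem.List.pyRange 1 (chosenOptions.length : Int) 1).foldl
      (fun acc i => acc ++ [PySem.List.pyGetD chosenOptions i ""]) []
    = chosenOptions.drop 1 := by
  rw [PySem.List.foldl_pyRange_pyGetD' chosenOptions "" (fun acc v => acc ++ [v]) [] (by omega : (0:Int) ≤ 1)]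
  rw [PySem.List.foldl_append_singleton_eq_self]
  simp

-- ===== VERDICT (by name: the statement is the Claim_ definition above) =====
theorem projectCSV_spec : Claim_equal_projectCSV := by
  intro csv chosenOptions _ hpre
  unfold Spec_projectCSV projectCSV projectCSV_alt
  rcases csv with _ | ⟨header, rest⟩
  · simp
  · have hk : ∀ k ∈ chosenOptions.drop 1, k ∈ header := by
      rcases hpre with h | h
      · exact absurd h (by simp)
      · simpa using h
    simp only [itemsToKeep_eq]
    rw [PySem.List.foldl_append_singleton_eq_map]
    simp only [List.nil_append]
    apply List.map_congr_left
    intro row _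
    simpa using gather_eq row header (chosenOptions.drop 1) hk
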